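-- pv_equiv track=rewrite | github.com/luhein/cad-processor | cad-processor.py | remove_sub_parts
-- ===== SOURCE A (Python) =====
-- pos_column = 0
--
-- key_column = 1
--
-- def remove_sub_parts(part_list, key_list):
--
--     def find_key_pos(part_list,key_list):
--         key_pos = []
--         for row in part_list[1:]:
--             if row[key_column] in key_list:
--                 key_pos.append(row[pos_column])
--         return key_pos
--
--     def filter_values(row):
--         key_pos = find_key_pos(part_list, key_list)
--         for val in key_pos:
--             if row[pos_column].startswith(val) and row[pos_column] != val:
--                 return False
--         return True
--
--     return list(filter(filter_values, part_list))
-- ===== SOURCE B (Python) =====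
-- pos_column = 0
--
-- key_column = 1
--
-- def remove_sub_parts(part_list, key_list):
--     keys = set(key_list)
--     key_pos = {row[pos_column] for row in part_list[1:] if row[key_column] in keys}
--     result = []
--     for row in part_list:
--         p = row[pos_column]
--         if all(p[:i] not in key_pos for i in range(len(p))):
--             result.append(row)
--     return result
-- ===== Notes on version B (the rewrite author's own statement) =====
-- stated objective: faster
-- what changed: B builds the key-position set once and keeps a row iff no proper prefix p[:i] of its position is in that set, instead of recomputing the key-position list for every row and scanning it with startswith.
-- outside the precondition, e.g. on remove_sub_parts([[], ['a', 'x']], ['k']): A returns [[], ['a', 'x']], B raises IndexError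
import Mathlib
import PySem

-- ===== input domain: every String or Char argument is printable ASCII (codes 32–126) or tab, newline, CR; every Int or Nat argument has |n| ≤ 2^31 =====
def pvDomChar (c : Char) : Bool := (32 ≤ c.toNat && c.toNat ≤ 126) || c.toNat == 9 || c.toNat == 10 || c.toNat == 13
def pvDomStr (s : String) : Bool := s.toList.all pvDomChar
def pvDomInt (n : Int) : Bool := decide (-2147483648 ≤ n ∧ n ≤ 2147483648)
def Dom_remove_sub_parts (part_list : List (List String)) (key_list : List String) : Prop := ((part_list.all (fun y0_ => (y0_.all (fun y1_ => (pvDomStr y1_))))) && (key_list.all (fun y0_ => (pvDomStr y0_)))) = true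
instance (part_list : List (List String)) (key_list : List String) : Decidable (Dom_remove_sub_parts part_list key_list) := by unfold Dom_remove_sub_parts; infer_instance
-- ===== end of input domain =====

-- B builds the key-position set once and tests the proper prefixes of each row's position
-- against it, instead of rebuilding the key-position list per row and scanning it with startswith.

-- ===== PORT A =====
-- A's inner helper find_key_pos: collect positions of tail rows whose key column is in key_list
def rspA_find_key_pos (part_list : List (List String)) (key_list : List String) : List String :=
  (PySem.List.slice part_list (some 1) none).foldl
    (fun key_pos row =>
      if key_list.contains ((PySem.List.pyGet? row 1).getD "") then
        key_pos ++ [((PySem.List.pyGet? row 0).getD "")]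
      else key_pos) []

-- A's inner helper filter_values: early-return-False loop over key_pos, rendered as List.all
def rspA_filter_values (part_list : List (List String)) (key_list : List String) (row : List String) : Bool :=
  let key_pos := rspA_find_key_pos part_list key_list
  key_pos.all (fun val =>
    !(PySem.Str.startswith ((PySem.List.pyGet? row 0).getD "") val &&
      ((PySem.List.pyGet? row 0).getD "") != val))

def remove_sub_parts (part_list : List (List String)) (key_list : List String) : List (List String) :=
  part_list.filter (fun row => rspA_filter_values part_list key_list row)

-- ===== PORT B =====
def remove_sub_parts_alt (part_list : List (List String)) (key_list : List String) : List (List String) :=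
  let keys : PySem.Set String := PySem.Set.ofList key_list
  let key_pos : PySem.Set String :=
    PySem.Set.ofList
      ((part_list.tail.filter (fun row => keys.contains ((PySem.List.pyGet? row 1).getD ""))).map
        (fun row => (PySem.List.pyGet? row 0).getD ""))
  part_list.foldl (fun result row =>
    let p := (PySem.List.pyGet? row 0).getD ""
    if (List.range (PySem.Str.len p).toNat).all
        (fun i => !(key_pos.contains (PySem.Str.slice p none (some (i : Int))))) then
      result ++ [row]
    else result) []

-- ===== PRECONDITION & SPEC =====
-- Pre_ excludes inputs where the Pythons raise IndexError: a tail row shorter than 2 (A and B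
-- raise on row[key_column]) or any row empty (B raises on row[pos_column]; A raises too unless
-- key_pos happens to be empty — that narrow corner, where A returns, is excluded and cited).
def Pre_remove_sub_parts (part_list : List (List String)) (key_list : List String) : Prop :=
  (∀ row ∈ part_list.tail, 2 ≤ row.length) ∧ (∀ row ∈ part_list, 1 ≤ row.length)
instance (part_list : List (List String)) (key_list : List String) : Decidable (Pre_remove_sub_parts part_list key_list) := by unfold Pre_remove_sub_parts; infer_instance

def pvWitness_remove_sub_parts : List (List String) × List String :=
  ([["", "root"], ["1", "a"], ["1.2", "b"], ["3", "a"]], ["a"])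

def Spec_remove_sub_parts (part_list : List (List String)) (key_list : List String) (out : List (List String)) : Prop := out = remove_sub_parts_alt part_list key_list
instance (part_list : List (List String)) (key_list : List String) (out : List (List String)) : Decidable (Spec_remove_sub_parts part_list key_list out) := by unfold Spec_remove_sub_parts; infer_instance

-- ===== CLAIM (what is proved, stated in full; the proofs are below) =====
def Claim_equal_remove_sub_parts : Prop := ∀ (part_list : List (List String)) (key_list : List String), Dom_remove_sub_parts part_list key_list → Pre_remove_sub_parts part_list key_list → Spec_remove_sub_parts part_list key_list (remove_sub_parts part_list key_list)

-- ===== LEMMAS AND PROOFS =====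

-- A's foldl-append accumulation is filter-then-map
theorem rsp_foldl_filter_map (l : List (List String)) (acc : List String)
    (c : List String → Bool) (f : List String → String) :
    l.foldl (fun kp row => if c row then kp ++ [f row] else kp) acc
      = acc ++ (l.filter c).map f := by
  induction l generalizing acc with
  | nil => simp
  | cons h t ih => by_cases hc : c h <;> simp [hc, ih]

theorem rsp_find_eq (part_list : List (List String)) (key_list : List String) :
    rspA_find_key_pos part_list key_list
      = (part_list.tail.filter
          (fun row => key_list.contains ((PySem.List.pyGet? row 1).getD ""))).map
          (fun row => (PySem.List.pyGet? row 0).getD "") := by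
  unfold rspA_find_key_pos
  rw [PySem.List.slice_from_one, rsp_foldl_filter_map]
  simp

-- bridge helpers used by the per-row predicate lemma
theorem rsp_contains_ofList (xs : List String) (x : String) :
    (PySem.Set.ofList xs).contains x = xs.contains x := by
  simp only [PySem.Set.contains_eq_listContains]
  have := PySem.Set.mem_ofList xs x
  by_cases h : x ∈ xs <;> simp_all

theorem rsp_len_toNat (p : String) : (PySem.Str.len p).toNat = p.toList.length := by
  simp [PySem.Str.len_eq]

theorem rsp_toList_slice (p : String) (i : Nat) :
    (PySem.Str.slice p none (some (i : Int))).toList = p.toList.take i := by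
  simp [PySem.Str.toList_slice, PySem.List.slice_to_natCast]

theorem rsp_startswith_iff (s v : String) :
    PySem.Str.startswith s v = true ↔ v.toList <+: s.toList := by
  rw [PySem.Str.startswith_eq]
  exact PySem.Chars.startswith_iff _ _

theorem rsp_contains_ofList_false (kp : List String) (x : String) :
    ((PySem.Set.ofList kp).contains x = false) ↔ x ∉ kp := by
  rw [rsp_contains_ofList]
  simp

-- the per-row predicates agree: "no val in kp is a proper prefix of p"
-- equals "no proper prefix p[:i] of p lies in set(kp)"
theorem rsp_pred_eq (kp : List String) (p : String) :
    kp.all (fun val => !(PySem.Str.startswith p val && p != val))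
      = (List.range (PySem.Str.len p).toNat).all
          (fun i => !((PySem.Set.ofList kp).contains (PySem.Str.slice p none (some (i : Int))))) := by
  rw [Bool.eq_iff_iff]
  simp only [List.all_eq_true, List.mem_range, Bool.not_eq_true', Bool.and_eq_false_iff,
    bne_eq_false_iff_eq, rsp_contains_ofList_false, rsp_len_toNat]
  constructor
  · intro h i hi hmem
    have htl := rsp_toList_slice p i
    rcases h _ hmem with hsw | heq
    · have hT : PySem.Str.startswith p (PySem.Str.slice p none (some (i : Int))) = true :=
        (rsp_startswith_iff p _).mpr (htl ▸ List.take_prefix i p.toList)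
      rw [hsw] at hT
      cases hT
    · have : (PySem.Str.slice p none (some (i : Int))).toList.length = p.toList.length :=
        congrArg (fun s => s.toList.length) heq.symm
      rw [htl, List.length_take] at this
      omega
  · intro h val hval
    by_cases hsw : PySem.Str.startswith p val = true
    · right
      have hpre : val.toList <+: p.toList := (rsp_startswith_iff p val).mp hsw
      by_contra hne
      have hne' : p ≠ val := fun e => hne e
      have hlt : val.toList.length < p.toList.length := by
        rcases Nat.lt_or_ge val.toList.length p.toList.length with h' | h'
        · exact h'
        · exact absurd (String.toList_inj.mp
            (List.IsPrefix.eq_of_length hpre (le_antisymm hpre.length_le h')).symm) hne'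
      have hval' : PySem.Str.slice p none (some (val.toList.length : Int)) = val := by
        apply String.toList_inj.mp
        rw [rsp_toList_slice]
        exact (List.prefix_iff_eq_take.mp hpre).symm
      refine h val.toList.length hlt ?_
      rw [hval']
      exact hval
    · left; simpa using hsw

-- B's foldl-append loop is a filter
theorem rsp_foldl_filter (l : List (List String)) (acc : List (List String))
    (c : List String → Bool) :
    l.foldl (fun res row => if c row then res ++ [row] else res) acc = acc ++ l.filter c := by
  induction l generalizing acc with
  | nil => simp
  | cons h t ih => by_cases hc : c h <;> simp [hc, ih]

-- ===== VERDICT (by name: the statement is the Claim_ definition above) =====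
theorem remove_sub_parts_spec : Claim_equal_remove_sub_parts := by
  intro part_list key_list _ _
  unfold Spec_remove_sub_parts remove_sub_parts remove_sub_parts_alt
  rw [rsp_foldl_filter]
  simp only [List.nil_append]
  apply List.filter_congr
  intro row _
  unfold rspA_filter_values
  rw [rsp_find_eq, rsp_pred_eq]
  simp only [rsp_contains_ofList]
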